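-- pv_equiv track=rewrite | github.com/OneIdentity/ansible-authentication-services | plugins/filter/ad_group_conflicts_filters.py | select_conflicting_groups
-- ===== SOURCE A (Python) =====
-- def select_conflicting_groups(groups):
--
--     conflicting_groups = {}
--     if len(groups) < 2:
--         return conflicting_groups
--
--     for id_outer, group_outer in enumerate(groups):
--         for id_inner, group_inner in enumerate(groups):
--             if id_inner <= id_outer:
--                 continue
--             if group_outer[2] == group_inner[2]:
--                 group_gid_number = group_outer[2]
--                 if group_gid_number not in conflicting_groups:
--                     conflicting_groups[group_gid_number] = []
--                 if group_outer not in conflicting_groups[group_gid_number]: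
--                     conflicting_groups[group_gid_number].append(group_outer)
--                 if group_inner not in conflicting_groups[group_gid_number]:
--                     conflicting_groups[group_gid_number].append(group_inner)
--
--     return conflicting_groups
-- ===== SOURCE B (Python) =====
-- def select_conflicting_groups(groups):
--     if len(groups) < 2:
--         return {}
--     counts = {}
--     buckets = {}
--     for group in groups:
--         gid = group[2]
--         counts[gid] = counts.get(gid, 0) + 1
--         bucket = buckets.setdefault(gid, [])
--         if group not in bucket:
--             bucket.append(group)
--     return {gid: bucket for gid, bucket in buckets.items()
--             if counts[gid] >= 2}
-- ===== Notes on version B (the rewrite author's own statement) =====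
-- stated objective: faster
-- what changed: A compares every pair of groups (i,j) with j>i and grows per-gid buckets pairwise; B makes one pass that buckets groups by gid (deduplicating within each bucket) while counting occurrences, then keeps only the gids seen at least twice.
import Mathlib
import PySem

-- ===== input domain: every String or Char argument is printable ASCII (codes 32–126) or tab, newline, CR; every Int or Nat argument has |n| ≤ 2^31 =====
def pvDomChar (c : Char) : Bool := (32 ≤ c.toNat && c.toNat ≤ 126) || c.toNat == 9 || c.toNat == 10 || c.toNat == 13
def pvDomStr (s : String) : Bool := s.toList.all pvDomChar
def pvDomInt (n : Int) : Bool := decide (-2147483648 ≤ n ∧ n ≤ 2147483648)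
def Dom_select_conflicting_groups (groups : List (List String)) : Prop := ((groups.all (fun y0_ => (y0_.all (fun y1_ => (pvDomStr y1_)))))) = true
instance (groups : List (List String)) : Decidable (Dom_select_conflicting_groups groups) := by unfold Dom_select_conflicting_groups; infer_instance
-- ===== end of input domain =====

-- B replaces A's quadratic all-pairs scan by one pass that buckets groups by gid
-- (with per-gid dedup) while counting occurrences, then keeps the gids seen twice.

-- ===== PORT A =====
def select_conflicting_groups (groups : List (List String)) : List (String × List (List String)) :=
  if PySem.List.len groups < 2 then []
  else
    ((PySem.List.enumerate groups).foldl (fun cg p =>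
      (PySem.List.enumerate groups).foldl (fun cg q =>
        if q.1 ≤ p.1 then cg
        else
          match PySem.List.pyGet? p.2 2, PySem.List.pyGet? q.2 2 with
          | some go2, some gi2 =>
            if go2 == gi2 then
              let cg1 := if cg.contains go2 then cg else cg.insert go2 []
              let b1 := cg1.getD go2 []
              let cg2 := if p.2 ∈ b1 then cg1 else cg1.insert go2 (b1 ++ [p.2])
              let b2 := cg2.getD go2 []
              if q.2 ∈ b2 then cg2 else cg2.insert go2 (b2 ++ [q.2])
            else cg
          | _, _ => cg) cg) (PySem.Dict.empty : PySem.Dict String (List (List String)))).items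

-- ===== PORT B =====
def select_conflicting_groups_alt (groups : List (List String)) : List (String × List (List String)) :=
  if PySem.List.len groups < 2 then []
  else
    let st := groups.foldl
      (fun (st : PySem.Dict String Int × PySem.Dict String (List (List String))) group =>
        match PySem.List.pyGet? group 2 with
        | some gid =>
          let counts := st.1.insert gid (st.1.getD gid 0 + 1)
          let buckets := st.2.setdefault gid []
          let bucket := buckets.getD gid []
          let buckets' := if group ∈ bucket then buckets else buckets.insert gid (bucket ++ [group])
          (counts, buckets')
        | none => st)
      (PySem.Dict.empty, PySem.Dict.empty)
    (st.2.items).filter (fun p => 2 ≤ st.1.getD p.1 0)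

-- ===== PRECONDITION & SPEC =====
-- Pre_ excludes only inputs on which A raises IndexError: lists of length ≥ 2
-- containing a group with fewer than 3 fields (A indexes group[2] there).
def Pre_select_conflicting_groups (groups : List (List String)) : Prop :=
  PySem.List.len groups < 2 ∨ ∀ g ∈ groups, 3 ≤ PySem.List.len g
instance (groups : List (List String)) : Decidable (Pre_select_conflicting_groups groups) := by unfold Pre_select_conflicting_groups; infer_instance
def pvWitness_select_conflicting_groups : List (List String) :=
  [["a", "b", "7"], ["c", "d", "7"], ["e", "f", "8"]]
def Spec_select_conflicting_groups (groups : List (List String)) (out : List (String × List (List String))) : Prop := out = select_conflicting_groups_alt groups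
instance (groups : List (List String)) (out : List (String × List (List String))) : Decidable (Spec_select_conflicting_groups groups out) := by unfold Spec_select_conflicting_groups; infer_instance

-- ===== CLAIM (what is proved, stated in full; the proofs are below) =====
def Claim_equal_select_conflicting_groups : Prop := ∀ (groups : List (List String)), Dom_select_conflicting_groups groups → Pre_select_conflicting_groups groups → Spec_select_conflicting_groups groups (select_conflicting_groups groups)

-- ===== LEMMAS AND PROOFS =====

-- the gid of a group (its third field), total form used by the proofs
def pvKey (g : List String) : String := PySem.List.pyGetD g 2 ""

-- the occurrences of gid k in l, in order
def pvOcc (l : List (List String)) (k : String) : List (List String) :=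
  l.filter (fun g => pvKey g == k)

-- the finished bucket entry for gid k
def pvEntry (l : List (List String)) (k : String) : String × List (List String) :=
  (k, PySem.Set.ofList (pvOcc l k))

-- the common reference value of both dicts' items
def pvRef (l : List (List String)) : List (String × List (List String)) :=
  ((PySem.Set.ofList (l.map pvKey)).filter
      (fun k => decide ((2 : Int) ≤ ((l.map pvKey).count k : Int)))).map (pvEntry l)

-- total form of A's inner-loop body (under Pre_, pyGet? g 2 = some (pvKey g))
def pvStepA (g gi : List String) (d : PySem.Dict String (List (List String))) : PySem.Dict String (List (List String)) :=
  if pvKey g == pvKey gi then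
    let d1 := if d.contains (pvKey g) then d else d.insert (pvKey g) []
    let b1 := d1.getD (pvKey g) []
    let d2 := if g ∈ b1 then d1 else d1.insert (pvKey g) (b1 ++ [g])
    let b2 := d2.getD (pvKey g) []
    if gi ∈ b2 then d2 else d2.insert (pvKey g) (b2 ++ [gi])
  else d

-- A's double loop as a structural "fold over strict suffixes"
def pvPairs : List (List String) → PySem.Dict String (List (List String)) → PySem.Dict String (List (List String))
  | [], d => d
  | g :: rest, d => pvPairs rest (rest.foldl (fun d gi => pvStepA g gi d) d)

-- total form of B's loop body acting on the buckets dict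
def pvStepB (d : PySem.Dict String (List (List String))) (g : List String) : PySem.Dict String (List (List String)) :=
  let d1 := d.setdefault (pvKey g) []
  let b := d1.getD (pvKey g) []
  if g ∈ b then d1 else d1.insert (pvKey g) (b ++ [g])

theorem pv_foldl_fixed_mem {α β : Type} (f : β → α → β) (l : List α) (d : β)
    (h : ∀ x ∈ l, f d x = d) : l.foldl f d = d := by
  induction l with
  | nil => rfl
  | cons x xs ih =>
      simp only [List.foldl_cons, h x (List.mem_cons_self)]
      exact ih (fun y hy => h y (List.mem_cons_of_mem _ hy))

theorem pv_insert_getD_self {κ ν : Type} [BEq κ] [LawfulBEq κ]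
    (d : PySem.Dict κ ν) (k : κ) (v0 : ν) (hnd : d.keys.Nodup)
    (hc : d.contains k = true) : d.insert k (d.getD k v0) = d := by
  apply PySem.Dict.ext
  rw [PySem.Dict.items_insert_of_contains _ _ hc]
  refine Eq.trans (List.map_congr_left ?_) (List.map_id _)
  intro p hp
  by_cases h : p.1 == k
  · have hk : p.1 = k := by simpa using h
    have hv : d.getD p.1 v0 = p.2 := PySem.Dict.getD_of_mem_items _ (by simpa using hp) hnd v0
    simp [h, ← hk, hv]
  · simp [h]

theorem pv_occ_append_self (l : List (List String)) (g : List String) :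
    pvOcc (l ++ [g]) (pvKey g) = pvOcc l (pvKey g) ++ [g] := by
  simp [pvOcc]

theorem pv_occ_cons_eq (x : List String) (rest : List (List String)) (k : String)
    (h : pvKey x = k) : pvOcc (x :: rest) k = x :: pvOcc rest k := by
  simp [pvOcc, h]

theorem pv_occ_cons_self (g : List String) (rest : List (List String)) :
    pvOcc (g :: rest) (pvKey g) = g :: pvOcc rest (pvKey g) := by
  simp [pvOcc]

theorem pv_occ_cons_ne (x : List String) (rest : List (List String)) (k : String)
    (h : pvKey x ≠ k) : pvOcc (x :: rest) k = pvOcc rest k := by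
  simp [pvOcc, h]

theorem pv_entry_cons_ne (g : List String) (rest : List (List String)) (k : String)
    (h : k ≠ pvKey g) : pvEntry (g :: rest) k = pvEntry rest k := by
  simp [pvEntry, pv_occ_cons_ne g rest k (Ne.symm h)]

theorem pv_stepA_ne (g gi : List String) (d : PySem.Dict String (List (List String)))
    (h : pvKey gi ≠ pvKey g) : pvStepA g gi d = d := by
  unfold pvStepA
  rw [if_neg (by simpa using fun e => h e.symm)]

theorem pv_stepA_sat (g gi : List String) (d : PySem.Dict String (List (List String)))
    (hk : pvKey gi = pvKey g) (hc : d.contains (pvKey g) = true)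
    (hg : g ∈ d.getD (pvKey g) []) :
    pvStepA g gi d
      = if gi ∈ d.getD (pvKey g) [] then d
        else d.insert (pvKey g) (d.getD (pvKey g) [] ++ [gi]) := by
  simp only [pvStepA, hk, beq_self_eq_true, if_true, hc, hg, if_pos]

theorem pv_innerA_sat (g : List String) (rest : List (List String))
    (d : PySem.Dict String (List (List String))) (hnd : d.keys.Nodup)
    (hc : d.contains (pvKey g) = true) (hg : g ∈ d.getD (pvKey g) []) :
    rest.foldl (fun d gi => pvStepA g gi d) d
      = d.insert (pvKey g) (PySem.Set.update (d.getD (pvKey g) []) (pvOcc rest (pvKey g))) := by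
  induction rest generalizing d with
  | nil =>
      simp only [List.foldl_nil, pvOcc, List.filter_nil, PySem.Set.update_nil]
      exact (pv_insert_getD_self d (pvKey g) [] hnd hc).symm
  | cons gi rest ih =>
      simp only [List.foldl_cons]
      by_cases hk : pvKey gi = pvKey g
      · rw [pv_stepA_sat g gi d hk hc hg]
        by_cases hgi : gi ∈ d.getD (pvKey g) []
        · rw [if_pos hgi, ih d hnd hc hg,
              pv_occ_cons_eq gi rest (pvKey g) hk, PySem.Set.update_cons,
              PySem.Set.add_of_mem hgi]
        · rw [if_neg hgi]
          have hcol : d.getD (pvKey g) [] ++ [gi] = PySem.Set.add (d.getD (pvKey g) []) gi :=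
            (PySem.Set.add_of_not_mem hgi).symm
          rw [hcol]
          set d' := d.insert (pvKey g) (PySem.Set.add (d.getD (pvKey g) []) gi) with hd'
          have hnd' : d'.keys.Nodup := PySem.Dict.nodup_keys_insert _ _ _ hnd
          have hc' : d'.contains (pvKey g) = true := PySem.Dict.contains_insert_self _ _ _
          have hgetD : d'.getD (pvKey g) [] = PySem.Set.add (d.getD (pvKey g) []) gi :=
            PySem.Dict.getD_insert_self _ _ _ _
          have hg' : g ∈ d'.getD (pvKey g) [] := by
            rw [hgetD]; exact (PySem.Set.mem_add _ _ _).mpr (Or.inl hg)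
          rw [ih d' hnd' hc' hg', hgetD, hd', PySem.Dict.insert_insert_self,
              pv_occ_cons_eq gi rest (pvKey g) hk, PySem.Set.update_cons]
      · rw [pv_stepA_ne g gi d hk, pv_occ_cons_ne gi rest (pvKey g) hk]
        exact ih d hnd hc hg

theorem pv_innerA_noop (g : List String) (rest : List (List String))
    (d : PySem.Dict String (List (List String))) (hnd : d.keys.Nodup)
    (hc : d.contains (pvKey g) = true)
    (hb : ∀ x ∈ g :: rest, pvKey x = pvKey g → x ∈ d.getD (pvKey g) []) :
    rest.foldl (fun d gi => pvStepA g gi d) d = d := by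
  apply pv_foldl_fixed_mem
  intro gi hgi
  by_cases hk : pvKey gi = pvKey g
  · rw [pv_stepA_sat g gi d hk hc (hb g List.mem_cons_self rfl),
        if_pos (hb gi (List.mem_cons_of_mem _ hgi) hk)]
  · exact pv_stepA_ne g gi d hk

theorem pv_innerA_fresh (g : List String) (rest : List (List String))
    (d : PySem.Dict String (List (List String))) (hnd : d.keys.Nodup)
    (hc : d.contains (pvKey g) = false) :
    rest.foldl (fun d gi => pvStepA g gi d) d
      = if pvOcc rest (pvKey g) = [] then d
        else d.insert (pvKey g) (PySem.Set.ofList (g :: pvOcc rest (pvKey g))) := by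
  induction rest with
  | nil => simp [pvOcc]
  | cons gi rest ih =>
      simp only [List.foldl_cons]
      by_cases hk : pvKey gi = pvKey g
      · have hstep : pvStepA g gi d = d.insert (pvKey g) (PySem.Set.add [g] gi) := by
          by_cases hgi : gi = g
          · subst hgi
            simp [pvStepA, hk, hc, PySem.Set.add, PySem.Dict.getD_insert_self,
              PySem.Dict.insert_insert_self]
          · have hadd : PySem.Set.add [g] gi = [g] ++ [gi] :=
              PySem.Set.add_of_not_mem (by simp [hgi])
            simp [pvStepA, hk, hc, hgi, hadd, PySem.Dict.getD_insert_self,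
              PySem.Dict.insert_insert_self]
        rw [hstep]
        set d' := d.insert (pvKey g) (PySem.Set.add [g] gi) with hd'
        have hnd' : d'.keys.Nodup := PySem.Dict.nodup_keys_insert _ _ _ hnd
        have hc' : d'.contains (pvKey g) = true := PySem.Dict.contains_insert_self _ _ _
        have hgetD : d'.getD (pvKey g) [] = PySem.Set.add [g] gi :=
          PySem.Dict.getD_insert_self _ _ _ _
        have hg' : g ∈ d'.getD (pvKey g) [] := by
          rw [hgetD]; exact (PySem.Set.mem_add _ _ _).mpr (Or.inl (by simp))
        rw [pv_innerA_sat g rest d' hnd' hc' hg', hgetD, hd', PySem.Dict.insert_insert_self,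
            pv_occ_cons_eq gi rest (pvKey g) hk, if_neg (List.cons_ne_nil _ _)]
        have : PySem.Set.ofList (g :: gi :: pvOcc rest (pvKey g))
            = PySem.Set.update (PySem.Set.add [g] gi) (pvOcc rest (pvKey g)) := by
          rw [← PySem.Set.update_nil_left, PySem.Set.update_cons, PySem.Set.update_cons]
          have : PySem.Set.add ([] : PySem.Set (List String)) g = [g] := by
            simpa using PySem.Set.add_of_not_mem (by simp)
          rw [this]
        rw [this]
      · rw [pv_stepA_ne g gi d hk, pv_occ_cons_ne gi rest (pvKey g) hk]
        exact ih

theorem pv_get2 (g : List String) (h : 3 ≤ PySem.List.len g) :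
    PySem.List.pyGet? g 2 = some (pvKey g) := by
  have h' : 2 < g.length := by
    rw [PySem.List.len_eq] at h; exact_mod_cast (by omega : (2 : Int) < (g.length : Int))
  have h1 := PySem.List.pyGet?_ofNat g 2 h'
  have h2 := PySem.List.pyGetD_ofNat g 2 "" h'
  unfold pvKey
  rw [show ((2 : Int) = ((2 : Nat) : Int)) from rfl, h1, h2]

theorem pv_tail (g : List String) (rest : List (List String)) (cA cB : String → Bool)
    (h : ∀ k' ∈ PySem.Set.ofList (rest.map pvKey), k' ≠ pvKey g → cA k' = cB k')
    (hK : (!cB (pvKey g) && decide ((2 : Int) ≤ ((rest.map pvKey).count (pvKey g) : Int))) = false) :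
    (((PySem.Set.ofList (rest.map pvKey)).discard (pvKey g)).filter
        (fun k => !cA k && decide ((2 : Int) ≤ ((pvKey g :: rest.map pvKey).count k : Int)))).map (pvEntry (g :: rest))
      = ((PySem.Set.ofList (rest.map pvKey)).filter
        (fun k => !cB k && decide ((2 : Int) ≤ ((rest.map pvKey).count k : Int)))).map (pvEntry rest) := by
  have hfe : ((PySem.Set.ofList (rest.map pvKey)).discard (pvKey g)).filter
        (fun k => !cA k && decide ((2 : Int) ≤ ((pvKey g :: rest.map pvKey).count k : Int)))
      = (PySem.Set.ofList (rest.map pvKey)).filter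
        (fun k => !cB k && decide ((2 : Int) ≤ ((rest.map pvKey).count k : Int))) := by
    unfold PySem.Set.discard
    rw [List.filter_filter]
    apply List.filter_congr
    intro k' hk'
    by_cases hkk : k' = pvKey g
    · subst hkk
      simp only [beq_self_eq_true, Bool.not_true, Bool.and_false]
      exact hK.symm
    · have hcnt : (pvKey g :: rest.map pvKey).count k' = (rest.map pvKey).count k' := by
        simp [List.count_cons, Ne.symm hkk]
      rw [hcnt, h k' hk' hkk]
      simp [hkk]
  rw [hfe]
  apply List.map_congr_left
  intro k' hk'
  have hcond := (List.mem_filter.mp hk').2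
  have hne : k' ≠ pvKey g := by
    intro he
    rw [he, hK] at hcond
    exact Bool.false_ne_true hcond
  exact pv_entry_cons_ne g rest k' hne

theorem pv_pairsA_items (l : List (List String))
    (d : PySem.Dict String (List (List String))) (hnd : d.keys.Nodup)
    (hsat : ∀ k v, d.get? k = some v → ∀ g ∈ l, pvKey g = k → g ∈ v) :
    (pvPairs l d).items
      = d.items ++ ((PySem.Set.ofList (l.map pvKey)).filter
          (fun k => !d.contains k && decide ((2 : Int) ≤ ((l.map pvKey).count k : Int)))).map (pvEntry l) := by
  induction l generalizing d with
  | nil => simp [pvPairs, PySem.Set.ofList]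
  | cons g rest ih =>
      simp only [pvPairs]
      by_cases hc : d.contains (pvKey g) = true
      · obtain ⟨v, hv⟩ : ∃ v, d.get? (pvKey g) = some v := by
          have hiso := PySem.Dict.contains_eq_isSome_get? d (pvKey g)
          rw [hc] at hiso
          exact Option.isSome_iff_exists.mp hiso.symm
        have hgd : d.getD (pvKey g) [] = v := PySem.Dict.getD_of_get?_eq_some d [] hv
        have hb : ∀ x ∈ g :: rest, pvKey x = pvKey g → x ∈ d.getD (pvKey g) [] := by
          intro x hx hkx; rw [hgd]; exact hsat (pvKey g) v hv x hx hkx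
        rw [pv_innerA_noop g rest d hnd hc hb,
            ih d hnd (fun k v hkv x hx hkx => hsat k v hkv x (List.mem_cons_of_mem _ hx) hkx)]
        congr 1
        simp only [List.map_cons, PySem.Set.ofList_cons, List.filter_cons]
        rw [if_neg (by simp [hc])]
        exact (pv_tail g rest d.contains d.contains (fun _ _ _ => rfl) (by simp [hc])).symm
      · have hc0 : d.contains (pvKey g) = false := Bool.not_eq_true _ ▸ eq_false_of_ne_true hc
        by_cases ho : pvOcc rest (pvKey g) = []
        · rw [pv_innerA_fresh g rest d hnd hc0, if_pos ho,
              ih d hnd (fun k v hkv x hx hkx => hsat k v hkv x (List.mem_cons_of_mem _ hx) hkx)]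
          congr 1
          have hnm : pvKey g ∉ rest.map pvKey := by
            intro hm
            obtain ⟨x, hx, hkx⟩ := List.mem_map.mp hm
            have hmem : x ∈ pvOcc rest (pvKey g) := List.mem_filter.mpr ⟨hx, by simp [hkx]⟩
            rw [ho] at hmem; simp at hmem
          have hcnt : (rest.map pvKey).count (pvKey g) = 0 := List.count_eq_zero.mpr hnm
          simp only [List.map_cons, PySem.Set.ofList_cons, List.filter_cons]
          rw [if_neg (by simp [List.count_cons, hcnt])]
          exact (pv_tail g rest d.contains d.contains (fun _ _ _ => rfl)
            (by simp [hcnt])).symm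
        · rw [pv_innerA_fresh g rest d hnd hc0, if_neg ho]
          set d' := d.insert (pvKey g) (PySem.Set.ofList (g :: pvOcc rest (pvKey g))) with hd'
          have hnd' : d'.keys.Nodup := PySem.Dict.nodup_keys_insert _ _ _ hnd
          have hsat' : ∀ k v, d'.get? k = some v → ∀ x ∈ rest, pvKey x = k → x ∈ v := by
            intro k v hkv x hx hkx
            by_cases hkK : k = pvKey g
            · subst hkK
              rw [hd', PySem.Dict.get?_insert_self] at hkv
              cases hkv
              exact (PySem.Set.mem_ofList _ _).mpr
                (List.mem_cons_of_mem _ (List.mem_filter.mpr ⟨hx, by simp [hkx]⟩))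
            · rw [hd', PySem.Dict.get?_insert_of_ne _ _ hkK] at hkv
              exact hsat k v hkv x (List.mem_cons_of_mem _ hx) hkx
          rw [ih d' hnd' hsat']
          have hitems : d'.items = d.items ++ [(pvKey g, PySem.Set.ofList (g :: pvOcc rest (pvKey g)))] :=
            PySem.Dict.items_insert_of_not_contains d _ hc0
          rw [hitems, List.append_assoc]
          congr 1
          have hKm : pvKey g ∈ rest.map pvKey := by
            obtain ⟨x, hx⟩ := List.exists_mem_of_ne_nil _ ho
            have := List.mem_filter.mp hx
            exact List.mem_map.mpr ⟨x, this.1, by simpa using this.2⟩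
          have hcnt1 : 1 ≤ (rest.map pvKey).count (pvKey g) := List.count_pos_iff.mpr hKm
          simp only [List.map_cons, PySem.Set.ofList_cons, List.filter_cons]
          rw [if_pos (by
            simp only [hc0, Bool.not_false, Bool.true_and, List.count_cons, beq_self_eq_true,
              if_pos]
            rw [decide_eq_true_eq]
            push_cast
            omega)]
          simp only [List.map_cons]
          rw [List.singleton_append]
          congr 1
          · show _ = pvEntry (g :: rest) (pvKey g)
            unfold pvEntry
            rw [pv_occ_cons_self, PySem.Set.ofList_cons]
          refine (pv_tail g rest d.contains d'.contains ?_ ?_).symm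
          · intro k' _ hk'
            rw [hd', PySem.Dict.contains_insert]
            simp [hk']
          · rw [hd']
            simp [PySem.Dict.contains_insert_self]

-- enumerate-elimination: the inner loop only touches the strict suffix
theorem pv_inner_high {α β : Type} (f : β → α → β) (xs : List α) (t m : Int) (d : β)
    (h : m < t) :
    (PySem.List.enumerate xs t).foldl (fun d q => if q.1 ≤ m then d else f d q.2) d
      = xs.foldl f d := by
  induction xs generalizing t d with
  | nil => rfl
  | cons x xs ih =>
      rw [PySem.List.enumerate_cons]
      simp only [List.foldl_cons, if_neg (by omega : ¬ (t ≤ m))]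
      exact ih (t + 1) _ (by omega)

theorem pv_inner_low {α β : Type} (f : β → α → β) (xs : List α) (t m : Int) (d : β)
    (h : t + xs.length ≤ m + 1) :
    (PySem.List.enumerate xs t).foldl (fun d q => if q.1 ≤ m then d else f d q.2) d = d := by
  induction xs generalizing t d with
  | nil => rfl
  | cons x xs ih =>
      rw [PySem.List.enumerate_cons]
      simp only [List.foldl_cons, if_pos (show t ≤ m by simp only [List.length_cons] at h; omega)]
      exact ih (t + 1) _ (by simp only [List.length_cons] at h; push_cast at h ⊢; omega)

theorem pv_inner_eq {α β : Type} (f : β → α → β) (pre suf : List α) (g : α) (d : β) :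
    (PySem.List.enumerate (pre ++ g :: suf) 0).foldl
        (fun d q => if q.1 ≤ (pre.length : Int) then d else f d q.2) d
      = suf.foldl f d := by
  rw [PySem.List.enumerate_append, List.foldl_append,
      pv_inner_low (f := f) (xs := pre) (t := 0) (m := (pre.length : Int)) (d := d) (h := by push_cast; omega), PySem.List.enumerate_cons]
  simp only [List.foldl_cons, if_pos (by omega : (0 : Int) + pre.length ≤ (pre.length : Int))]
  exact pv_inner_high _ _ _ _ _ (by omega)

theorem pv_outer_eq (pre suf : List (List String))
    (d : PySem.Dict String (List (List String))) :
    (PySem.List.enumerate suf (pre.length : Int)).foldl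
        (fun d p =>
          (PySem.List.enumerate (pre ++ suf) 0).foldl
            (fun d q => if q.1 ≤ p.1 then d else pvStepA p.2 q.2 d) d) d
      = pvPairs suf d := by
  induction suf generalizing pre d with
  | nil => rfl
  | cons g rest ih =>
      rw [PySem.List.enumerate_cons]
      simp only [List.foldl_cons]
      rw [pv_inner_eq (fun d gi => pvStepA g gi d) pre rest g d]
      have h1 : ((pre ++ [g]).length : Int) = (pre.length : Int) + 1 := by simp
      have h2 : pre ++ g :: rest = (pre ++ [g]) ++ rest := by simp
      rw [h2, ← h1, ih (pre ++ [g])]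
      rfl

theorem pv_entry_append_ne (l : List (List String)) (g : List String) (k : String)
    (h : k ≠ pvKey g) : pvEntry (l ++ [g]) k = pvEntry l k := by
  unfold pvEntry pvOcc
  rw [List.filter_append]
  have : List.filter (fun x => pvKey x == k) [g] = [] := by simp [Ne.symm h]
  rw [this, List.append_nil]

theorem pv_bucketsB_items (l : List (List String)) :
    (l.foldl pvStepB PySem.Dict.empty).items
      = (PySem.Set.ofList (l.map pvKey)).map (pvEntry l) := by
  induction l using List.reverseRecOn with
  | nil => rfl
  | append_singleton l g ih =>
      rw [List.foldl_append, List.foldl_cons, List.foldl_nil]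
      set D := l.foldl pvStepB PySem.Dict.empty with hD
      have hkeys : D.keys = PySem.Set.ofList (l.map pvKey) := by
        show D.items.map (·.1) = _
        rw [ih, List.map_map]
        have hcomp : ((·.1) ∘ pvEntry l) = (id : String → String) := by funext k; rfl
        rw [hcomp, List.map_id]
      have hnd : D.keys.Nodup := by rw [hkeys]; exact PySem.Set.nodup_ofList _
      simp only [List.map_append, List.map_cons, List.map_nil,
        PySem.Set.ofList_append_singleton]
      by_cases hm : pvKey g ∈ PySem.Set.ofList (l.map pvKey)
      · have hcon : D.contains (pvKey g) = true :=
          (PySem.Dict.contains_iff_mem_keys D (pvKey g)).mpr (hkeys ▸ hm)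
        have hbmem : (pvKey g, PySem.Set.ofList (pvOcc l (pvKey g))) ∈ D.items := by
          rw [ih]; exact List.mem_map.mpr ⟨pvKey g, hm, rfl⟩
        have hb : D.getD (pvKey g) [] = PySem.Set.ofList (pvOcc l (pvKey g)) :=
          PySem.Dict.getD_of_mem_items D hbmem hnd []
        rw [PySem.Set.add_of_mem hm]
        have hstepB : pvStepB D g
            = if g ∈ PySem.Set.ofList (pvOcc l (pvKey g)) then D
              else D.insert (pvKey g) (PySem.Set.ofList (pvOcc l (pvKey g)) ++ [g]) := by
          simp only [pvStepB, PySem.Dict.setdefault_of_contains D [] hcon, hb]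
        rw [hstepB]
        by_cases hg : g ∈ PySem.Set.ofList (pvOcc l (pvKey g))
        · rw [if_pos hg, ih]
          apply List.map_congr_left
          intro k' hk'
          by_cases hkk : k' = pvKey g
          · subst hkk
            unfold pvEntry
            rw [pv_occ_append_self, PySem.Set.ofList_append_singleton,
                PySem.Set.add_of_mem hg]
          · exact (pv_entry_append_ne l g k' hkk).symm
        · rw [if_neg hg, PySem.Dict.items_insert_of_contains D _ hcon, ih, List.map_map]
          apply List.map_congr_left
          intro k' hk'
          by_cases hkk : k' = pvKey g
          · subst hkk
            simp only [Function.comp_apply]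
            rw [if_pos (by simp [pvEntry])]
            unfold pvEntry
            rw [pv_occ_append_self, PySem.Set.ofList_append_singleton,
                PySem.Set.add_of_not_mem hg]
          · simp only [Function.comp_apply]
            have h1 : ((pvEntry l k').1 == pvKey g) = false := by simp [pvEntry, hkk]
            rw [h1]
            simp only [Bool.false_eq_true, if_false]
            exact (pv_entry_append_ne l g k' hkk).symm
      · have hcon : D.contains (pvKey g) = false := by
          rw [PySem.Dict.contains_eq_decide_mem_keys, hkeys]
          simpa using hm
        have hocc : pvOcc l (pvKey g) = [] := by
          rw [pvOcc, List.filter_eq_nil_iff]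
          intro x hx hbe
          exact hm ((PySem.Set.mem_ofList _ _).mpr
            (List.mem_map.mpr ⟨x, hx, by simpa using hbe⟩))
        rw [PySem.Set.add_of_not_mem hm]
        have hstepB : pvStepB D g = D.insert (pvKey g) [g] := by
          simp [pvStepB, PySem.Dict.setdefault_of_not_contains D [] hcon,
            PySem.Dict.getD_insert_self, PySem.Dict.insert_insert_self]
        rw [hstepB, PySem.Dict.items_insert_of_not_contains D _ hcon, ih]
        rw [List.map_append, List.map_cons, List.map_nil]
        congr 1
        · apply List.map_congr_left
          intro k' hk'
          have hkk : k' ≠ pvKey g := fun he => hm (he ▸ hk')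
          exact (pv_entry_append_ne l g k' hkk).symm
        · have hent : pvEntry (l ++ [g]) (pvKey g) = (pvKey g, [g]) := by
            unfold pvEntry pvOcc
            rw [List.filter_append]
            have h1 : List.filter (fun x => pvKey x == pvKey g) l = [] := hocc
            rw [h1, List.nil_append]
            have h2 : List.filter (fun x => pvKey x == pvKey g) [g] = [g] := by simp
            rw [h2]
            rfl
          rw [hent]

theorem pv_ref_A (groups : List (List String))
    (hlen : ∀ g ∈ groups, 3 ≤ PySem.List.len g) (h2 : ¬ PySem.List.len groups < 2) :
    select_conflicting_groups groups = pvRef groups := by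
  unfold select_conflicting_groups
  rw [if_neg h2]
  have hstep : (PySem.List.enumerate groups).foldl (fun cg p =>
      (PySem.List.enumerate groups).foldl (fun cg q =>
        if q.1 ≤ p.1 then cg
        else
          match PySem.List.pyGet? p.2 2, PySem.List.pyGet? q.2 2 with
          | some go2, some gi2 =>
            if go2 == gi2 then
              let cg1 := if cg.contains go2 then cg else cg.insert go2 []
              let b1 := cg1.getD go2 []
              let cg2 := if p.2 ∈ b1 then cg1 else cg1.insert go2 (b1 ++ [p.2])
              let b2 := cg2.getD go2 []
              if q.2 ∈ b2 then cg2 else cg2.insert go2 (b2 ++ [q.2])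
            else cg
          | _, _ => cg) cg) (PySem.Dict.empty : PySem.Dict String (List (List String)))
      = (PySem.List.enumerate groups).foldl (fun cg p =>
          (PySem.List.enumerate groups).foldl
            (fun cg q => if q.1 ≤ p.1 then cg else pvStepA p.2 q.2 cg) cg)
          PySem.Dict.empty := by
    apply PySem.List.foldl_congr_mem
    intro acc p hp
    apply PySem.List.foldl_congr_mem
    intro acc2 q hq
    by_cases hle : q.1 ≤ p.1
    · simp only [if_pos hle]
    · simp only [if_neg hle]
      have hp2 : p.2 ∈ groups := by
        obtain ⟨k, hk, hpk⟩ := (PySem.List.mem_enumerate_iff _ _ _).mp hp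
        rw [hpk]; exact List.getElem_mem hk
      have hq2 : q.2 ∈ groups := by
        obtain ⟨k, hk, hqk⟩ := (PySem.List.mem_enumerate_iff _ _ _).mp hq
        rw [hqk]; exact List.getElem_mem hk
      rw [pv_get2 p.2 (hlen p.2 hp2), pv_get2 q.2 (hlen q.2 hq2)]
      rfl
  rw [hstep]

  have houter := pv_outer_eq [] groups PySem.Dict.empty
  simp only [List.nil_append, List.length_nil, Nat.cast_zero] at houter
  rw [houter]
  rw [pv_pairsA_items groups PySem.Dict.empty List.nodup_nil
        (fun k v hkv => by rw [PySem.Dict.get?_empty] at hkv; cases hkv)]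
  unfold pvRef
  have hempty : (PySem.Dict.empty : PySem.Dict String (List (List String))).items = [] := rfl
  rw [hempty, List.nil_append]
  congr 1

theorem pv_ref_B (groups : List (List String))
    (hlen : ∀ g ∈ groups, 3 ≤ PySem.List.len g) (h2 : ¬ PySem.List.len groups < 2) :
    select_conflicting_groups_alt groups = pvRef groups := by
  unfold select_conflicting_groups_alt
  rw [if_neg h2]
  have hsplit : groups.foldl
      (fun (st : PySem.Dict String Int × PySem.Dict String (List (List String))) group =>
        match PySem.List.pyGet? group 2 with
        | some gid =>
          let counts := st.1.insert gid (st.1.getD gid 0 + 1)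
          let buckets := st.2.setdefault gid []
          let bucket := buckets.getD gid []
          let buckets' := if group ∈ bucket then buckets else buckets.insert gid (bucket ++ [group])
          (counts, buckets')
        | none => st)
      (PySem.Dict.empty, PySem.Dict.empty)
      = (PySem.Dict.counter (groups.map pvKey), groups.foldl pvStepB PySem.Dict.empty) := by
    rw [PySem.List.foldl_congr_mem groups _
        (fun st group => (st.1.insert (pvKey group) (st.1.getD (pvKey group) 0 + 1),
          pvStepB st.2 group)) _
        (fun acc g hg => by rw [pv_get2 g (hlen g hg)]; rfl)]
    have h1 := PySem.List.foldl_prod_mk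
        (f := fun (c : PySem.Dict String Int) (group : List String) =>
          c.insert (pvKey group) (c.getD (pvKey group) 0 + 1))
        (g := pvStepB) (l := groups) (a := PySem.Dict.empty) (b := PySem.Dict.empty)
    refine Eq.trans h1 ?_
    rw [← List.foldl_map (f := pvKey)
        (g := fun (c : PySem.Dict String Int) (x : String) => c.insert x (c.getD x 0 + 1)),
      PySem.Dict.foldl_insert_getD_add_one_eq_counter]
  simp only [hsplit]
  rw [pv_bucketsB_items, List.filter_map]
  unfold pvRef
  congr 1
  apply List.filter_congr
  intro k _
  simp only [Function.comp_apply, pvEntry, PySem.Dict.getD_counter]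
  rfl

-- ===== VERDICT (by name: the statement is the Claim_ definition above) =====
theorem select_conflicting_groups_spec : Claim_equal_select_conflicting_groups := by
  intro groups _ hpre
  unfold Spec_select_conflicting_groups
  by_cases h2 : PySem.List.len groups < 2
  · simp only [select_conflicting_groups, select_conflicting_groups_alt, if_pos h2]
  · have hlen : ∀ g ∈ groups, 3 ≤ PySem.List.len g := hpre.resolve_left h2
    rw [pv_ref_A groups hlen h2, pv_ref_B groups hlen h2]
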